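-- pv_equiv track=rewrite | github.com/oraoraoraaa/cross-ecosystem-replication | scripts/6_analyze_patterns/detect_binding.py | format_tree_structure
-- ===== SOURCE A (Python) =====
-- from typing import Dict, List, Optional
--
-- def identify_folders(paths: List[str]) -> set:
--     """Identify which paths are folders based on having children."""
--     folders = set()
--     sorted_paths = sorted(paths)
--
--     for i, path in enumerate(sorted_paths):
--         # Check if any subsequent path starts with this path + '/'
--         prefix = path + '/'
--         for j in range(i + 1, len(sorted_paths)):
--             if sorted_paths[j].startswith(prefix):
--                 folders.add(path)
--                 break
--             elif not sorted_paths[j].startswith(path):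
--                 # No need to check further as paths are sorted
--                 break
--
--     return folders
--
-- def format_tree_structure(paths: List[str]) -> str:
--     """Convert flat path list to tree-like structure for display.
--
--     Args:
--         paths: List of file/folder paths
--
--     Returns:
--         String representation of directory tree
--     """
--     if not paths:
--         return ""
--
--     # Identify folders
--     folders = identify_folders(paths)
--
--     # Sort paths for consistent output
--     sorted_paths = sorted(paths)
--
--     lines = []
--     for path in sorted_paths:
--         depth = path.count('/')
--         indent = "│   " * depth
--         name = path.split('/')[-1]
--
--         # Determine if last item at this level
--         prefix = "├── "
--
--         if path in folders:
--             lines.append(f"{indent}{prefix}{name}/")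
--         else:
--             lines.append(f"{indent}{prefix}{name}")
--
--     return '\n'.join(lines)
-- ===== SOURCE B (Python) =====
-- def format_tree_structure(paths):
--     """Convert flat path list to tree-like structure for display.
--
--     Folder detection: instead of scanning successors in the sorted list for
--     each path (quadratic), collect every proper '/'-delimited ancestor prefix
--     of every path into one hash set, once.
--     """
--     if not paths:
--         return ""
--
--     folders = set()
--     for q in paths:
--         for k, ch in enumerate(q):
--             if ch == '/':
--                 folders.add(q[:k])
--
--     lines = []
--     for p in sorted(paths):
--         name = p.split('/')[-1]
--         line = "│   " * p.count('/') + "├── " + name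
--         if p in folders:
--             line += "/"
--         lines.append(line)
--     return '\n'.join(lines)
-- ===== Notes on version B (the rewrite author's own statement) =====
-- stated objective: faster
-- what changed: Folder detection no longer scans the successors of each path in the sorted list; instead every '/'-delimited ancestor prefix of every path is collected once into a hash set and each path is tested by a single set lookup.
import Mathlib
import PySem

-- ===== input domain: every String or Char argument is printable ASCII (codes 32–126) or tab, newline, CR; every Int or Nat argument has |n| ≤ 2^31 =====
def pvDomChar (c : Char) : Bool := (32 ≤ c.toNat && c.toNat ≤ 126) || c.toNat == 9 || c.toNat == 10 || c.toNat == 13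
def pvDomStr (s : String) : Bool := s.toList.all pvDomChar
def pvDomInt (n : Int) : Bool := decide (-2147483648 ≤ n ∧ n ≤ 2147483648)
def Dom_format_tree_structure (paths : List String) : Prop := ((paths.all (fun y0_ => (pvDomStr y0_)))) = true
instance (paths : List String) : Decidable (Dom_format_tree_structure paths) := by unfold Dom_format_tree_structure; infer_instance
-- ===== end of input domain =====

-- B replaces A's per-path scan of the successors in the sorted list by one hash set of every
-- '/'-delimited ancestor prefix, built in a single pass over the raw paths (objective: faster).

-- Python "s" * n (string repetition, n ≥ 0); used by both ports
def pvStrRepeat (s : String) (n : Nat) : String :=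
  match n with
  | 0 => ""
  | n + 1 => pvStrRepeat s n ++ s

-- ===== PORT A =====
-- inner loop of identify_folders: 'for j in range(i+1, n)' over the successors of path,
-- with the two break conditions in source order
def pvScanA (pfx path : String) : List String → Bool
  | [] => false
  | q :: rest =>
    if PySem.Str.startswith q pfx then true
    else if !(PySem.Str.startswith q path) then false
    else pvScanA pfx path rest

-- outer loop of identify_folders: each path is checked against its own tail of sorted_paths
def pvFoldersA : List String → PySem.Set String → PySem.Set String
  | [], folders => folders
  | path :: rest, folders =>
      pvFoldersA rest (if pvScanA (path ++ "/") path rest then PySem.Set.add folders path else folders)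

def identify_folders (paths : List String) : PySem.Set String :=
  pvFoldersA (PySem.List.sorted paths (fun x => x)) PySem.Set.empty

def format_tree_structure (paths : List String) : String :=
  if paths = [] then ""
  else
    let folders := identify_folders paths
    let sorted_paths := PySem.List.sorted paths (fun x => x)
    let lines := sorted_paths.foldl (fun lines path =>
      let indent := pvStrRepeat "│   " (PySem.Str.count path "/")
      -- path.split('/')[-1]; split? is some ("/" ≠ "") and nonempty, so the defaults never fire
      let name := (PySem.List.pyGet? ((PySem.Str.split? path "/").getD []) (-1)).getD ""
      if PySem.Set.contains folders path then lines ++ [indent ++ "├── " ++ name ++ "/"]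
      else lines ++ [indent ++ "├── " ++ name]) []
    PySem.Str.join "\n" lines

-- ===== PORT B =====
-- one pass over the raw paths: q[:k] is a folder for every '/' at index k of q
def pvFoldersB (paths : List String) : PySem.Set String :=
  paths.foldl (fun fs q =>
    (PySem.List.enumerate q.toList).foldl (fun fs kc =>
      if kc.2 = '/' then PySem.Set.add fs (PySem.Str.slice q none (some kc.1)) else fs) fs)
    PySem.Set.empty

def pvRenderB (folders : PySem.Set String) (p : String) : String :=
  -- p.split('/')[-1]; split? is some ("/" ≠ "") and nonempty, so the defaults never fire
  let name := (PySem.List.pyGet? ((PySem.Str.split? p "/").getD []) (-1)).getD ""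
  let line := pvStrRepeat "│   " (PySem.Str.count p "/") ++ "├── " ++ name
  if PySem.Set.contains folders p then line ++ "/" else line

def format_tree_structure_alt (paths : List String) : String :=
  if paths = [] then ""
  else
    PySem.Str.join "\n"
      ((PySem.List.sorted paths (fun x => x)).map (pvRenderB (pvFoldersB paths)))

-- ===== PRECONDITION & SPEC =====
def Spec_format_tree_structure (paths : List String) (out : String) : Prop := out = format_tree_structure_alt paths
instance (paths : List String) (out : String) : Decidable (Spec_format_tree_structure paths out) := by unfold Spec_format_tree_structure; infer_instance

-- ===== CLAIM (what is proved, stated in full; the proofs are below) =====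
def Claim_equal_format_tree_structure : Prop := ∀ (paths : List String), Dom_format_tree_structure paths → Spec_format_tree_structure paths (format_tree_structure paths)

-- ===== LEMMAS AND PROOFS =====

-- a proper prefix is lexicographically smaller
theorem pv_lex_prefix_lt (p : List Char) (c : Char) (u : List Char) :
    List.Lex (·<·) p (p ++ c :: u) := by
  induction p with
  | nil => exact List.Lex.nil
  | cons a t ih => exact List.Lex.cons ih

-- if p is a prefix of t and p ≤ s ≤ t (as ¬Lex), then p is a prefix of s
theorem pv_lex_sandwich (p : List Char) : ∀ (s t : List Char), p <+: t →
    ¬ List.Lex (·<·) s p → ¬ List.Lex (·<·) t s → p <+: s := by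
  induction p with
  | nil => intro s t _ _ _; exact List.nil_prefix
  | cons a p' ih =>
    intro s t hpt hps hst
    obtain ⟨u, hu⟩ := hpt
    cases s with
    | nil => exact absurd List.Lex.nil hps
    | cons b s' =>
      cases t with
      | nil => exact absurd hu (by simp)
      | cons c t' =>
        rw [List.cons_append] at hu
        injection hu with hac hu'
        subst hac
        rcases lt_trichotomy a b with h | h | h
        · exact absurd (List.Lex.rel h) hst
        · subst h
          have hps' : ¬ List.Lex (·<·) s' p' := fun hl => hps (List.Lex.cons hl)
          have hst' : ¬ List.Lex (·<·) t' s' := fun hl => hst (List.Lex.cons hl)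
          exact List.cons_prefix_cons.mpr ⟨rfl, ih s' t' ⟨u, hu'⟩ hps' hst'⟩
        · exact absurd (List.Lex.rel h) hps

-- Python's string ≤ at the List Char level
theorem pv_str_le_iff (s t : String) : s ≤ t ↔ ¬ List.Lex (·<·) t.toList s.toList := by
  rw [← not_lt, String.lt_iff_toList_lt]; exact Iff.rfl

theorem pv_startswith_iff (q p : String) :
    PySem.Str.startswith q p = true ↔ p.toList <+: q.toList := by
  rw [PySem.Str.startswith_eq]; exact PySem.Chars.startswith_iff _ _

theorem pv_startswith_slash_iff (q p : String) :
    PySem.Str.startswith q (p ++ "/") = true ↔ (p.toList ++ ['/']) <+: q.toList := by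
  rw [pv_startswith_iff, String.toList_append]; exact Iff.rfl

-- x ++ "/" a prefix of q makes x strictly smaller than q
theorem pv_pre_lt (x q : String) (h : (x.toList ++ ['/']) <+: q.toList) :
    List.Lex (·<·) x.toList q.toList := by
  obtain ⟨u, hu⟩ := h
  rw [← hu, List.append_assoc]
  exact pv_lex_prefix_lt _ _ _

theorem pv_no_self (x q : String) (hle : q ≤ x) (h : (x.toList ++ ['/']) <+: q.toList) : False :=
  (pv_str_le_iff q x).mp hle (pv_pre_lt x q h)

-- A's inner scan over a sorted tail finds exactly "some element has p/ as a prefix"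
theorem pv_scanA_iff (p : String) (l : List String)
    (hall : ∀ q ∈ l, p ≤ q) (hsort : l.Pairwise (· ≤ ·)) :
    (pvScanA (p ++ "/") p l = true ↔ ∃ q ∈ l, (p.toList ++ ['/']) <+: q.toList) := by
  induction l with
  | nil => simp [pvScanA]
  | cons q rest ih =>
    rw [List.pairwise_cons] at hsort
    obtain ⟨hq, hrest⟩ := hsort
    by_cases h1 : PySem.Str.startswith q (p ++ "/") = true
    · simp only [pvScanA, h1, if_true]
      constructor
      · intro _; exact ⟨q, List.mem_cons_self, (pv_startswith_slash_iff q p).mp h1⟩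
      · intro _; trivial
    · have hnpre : ¬ (p.toList ++ ['/']) <+: q.toList := fun h => h1 ((pv_startswith_slash_iff q p).mpr h)
      by_cases h2 : PySem.Str.startswith q p = true
      · -- successor still inside the p-block: recurse
        simp only [pvScanA, h1, h2, if_false, Bool.not_true, Bool.false_eq_true]
        rw [ih (fun r hr => hall r (List.mem_cons_of_mem _ hr)) hrest]
        constructor
        · rintro ⟨r, hr, hpre⟩; exact ⟨r, List.mem_cons_of_mem _ hr, hpre⟩
        · rintro ⟨r, hr, hpre⟩
          rcases List.mem_cons.mp hr with rfl | hr'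
          · exact absurd hpre hnpre
          · exact ⟨r, hr', hpre⟩
      · -- break: by sortedness no later element can match either
        simp only [pvScanA, h1, h2, Bool.not_false, if_false, Bool.false_eq_true]
        constructor
        · intro h; exact absurd h (by simp)
        · rintro ⟨r, hr, hpre⟩
          rcases List.mem_cons.mp hr with rfl | hr'
          · exact absurd hpre hnpre
          · have hpr : p.toList <+: r.toList := (List.prefix_append _ _).trans hpre
            have hpsq : ¬ List.Lex (·<·) q.toList p.toList :=
              (pv_str_le_iff p q).mp (hall q List.mem_cons_self)
            have hqr : ¬ List.Lex (·<·) r.toList q.toList :=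
              (pv_str_le_iff q r).mp (hq r hr')
            have := pv_lex_sandwich p.toList q.toList r.toList hpr hpsq hqr
            exact absurd ((pv_startswith_iff q p).mpr this) h2

-- membership in A's folders accumulator
theorem pv_mem_foldersA (l : List String) (fs : PySem.Set String) (x : String)
    (hsort : l.Pairwise (· ≤ ·)) :
    (x ∈ pvFoldersA l fs ↔ x ∈ fs ∨ (x ∈ l ∧ ∃ q ∈ l, (x.toList ++ ['/']) <+: q.toList)) := by
  induction l generalizing fs with
  | nil => simp [pvFoldersA]
  | cons p rest ih =>
    rw [List.pairwise_cons] at hsort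
    obtain ⟨hp, hrest⟩ := hsort
    show x ∈ pvFoldersA rest _ ↔ _
    rw [ih _ hrest]
    by_cases hscan : pvScanA (p ++ "/") p rest = true
    · rw [if_pos hscan, PySem.Set.mem_add]
      obtain ⟨w, hw, hwpre⟩ := (pv_scanA_iff p rest (fun q hq => hp q hq) hrest).mp hscan
      constructor
      · rintro ((hfs | rfl) | ⟨hxl, q, hq, hpre⟩)
        · exact Or.inl hfs
        · exact Or.inr ⟨List.mem_cons_self, w, List.mem_cons_of_mem _ hw, hwpre⟩
        · exact Or.inr ⟨List.mem_cons_of_mem _ hxl, q, List.mem_cons_of_mem _ hq, hpre⟩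
      · rintro (hfs | ⟨hxl, q, hq, hpre⟩)
        · exact Or.inl (Or.inl hfs)
        · rcases List.mem_cons.mp hxl with rfl | hxl'
          · exact Or.inl (Or.inr rfl)
          · rcases List.mem_cons.mp hq with rfl | hq'
            · exact absurd hpre (fun h => pv_no_self x q (hp x hxl') h)
            · exact Or.inr ⟨hxl', q, hq', hpre⟩
    · rw [if_neg hscan]
      have hnone : ¬ ∃ q ∈ rest, (p.toList ++ ['/']) <+: q.toList :=
        fun h => hscan ((pv_scanA_iff p rest (fun q hq => hp q hq) hrest).mpr h)
      constructor
      · rintro (hfs | ⟨hxl, q, hq, hpre⟩)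
        · exact Or.inl hfs
        · exact Or.inr ⟨List.mem_cons_of_mem _ hxl, q, List.mem_cons_of_mem _ hq, hpre⟩
      · rintro (hfs | ⟨hxl, q, hq, hpre⟩)
        · exact Or.inl hfs
        · rcases List.mem_cons.mp hxl with rfl | hxl'
          · rcases List.mem_cons.mp hq with rfl | hq'
            · exact absurd hpre (fun h => pv_no_self _ _ (le_refl _) h)
            · exact absurd ⟨q, hq', hpre⟩ hnone
          · rcases List.mem_cons.mp hq with rfl | hq'
            · exact absurd hpre (fun h => pv_no_self x q (hp x hxl') h)
            · exact Or.inr ⟨hxl', q, hq', hpre⟩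

-- membership through B's inner fold over one enumerated string
theorem pv_mem_inner (q : String) (l : List (Int × Char)) (fs : PySem.Set String) (x : String) :
    (x ∈ l.foldl (fun fs kc =>
      if kc.2 = '/' then PySem.Set.add fs (PySem.Str.slice q none (some kc.1)) else fs) fs ↔
     x ∈ fs ∨ ∃ kc ∈ l, kc.2 = '/' ∧ x = PySem.Str.slice q none (some kc.1)) := by
  induction l generalizing fs with
  | nil => simp
  | cons kc rest ih =>
    simp only [List.foldl_cons]
    by_cases h : kc.2 = '/'
    · rw [if_pos h, ih, PySem.Set.mem_add]
      constructor
      · rintro ((hfs | rfl) | ⟨kc', hkc', h2, hx⟩)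
        · exact Or.inl hfs
        · exact Or.inr ⟨kc, List.mem_cons_self, h, rfl⟩
        · exact Or.inr ⟨kc', List.mem_cons_of_mem _ hkc', h2, hx⟩
      · rintro (hfs | ⟨kc', hkc', h2, hx⟩)
        · exact Or.inl (Or.inl hfs)
        · rcases List.mem_cons.mp hkc' with rfl | hkc''
          · exact Or.inl (Or.inr hx)
          · exact Or.inr ⟨kc', hkc'', h2, hx⟩
    · rw [if_neg h, ih]
      constructor
      · rintro (hfs | ⟨kc', hkc', h2, hx⟩)
        · exact Or.inl hfs
        · exact Or.inr ⟨kc', List.mem_cons_of_mem _ hkc', h2, hx⟩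
      · rintro (hfs | ⟨kc', hkc', h2, hx⟩)
        · exact Or.inl hfs
        · rcases List.mem_cons.mp hkc' with rfl | hkc''
          · exact absurd h2 h
          · exact Or.inr ⟨kc', hkc'', h2, hx⟩

-- per-string: a '/' at index k with x = q[:k]  ↔  x ++ '/' is a prefix of q
theorem pv_inner_iff (q x : String) :
    ((∃ kc ∈ PySem.List.enumerate q.toList, kc.2 = '/' ∧ x = PySem.Str.slice q none (some kc.1)) ↔
      (x.toList ++ ['/']) <+: q.toList) := by
  constructor
  · rintro ⟨kc, hkc, hsl, rfl⟩
    rw [PySem.List.mem_enumerate_iff] at hkc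
    obtain ⟨k, hk, hkc⟩ := hkc
    subst hkc
    simp only at hsl
    have htl : (PySem.Str.slice q none (some ((0:Int) + k))).toList = q.toList.take k := by
      rw [PySem.Str.toList_slice]
      simp only [PySem.Chars.slice_eq_listSlice, zero_add]
      exact PySem.List.slice_to_natCast _ _
    rw [htl, ← hsl]
    have : q.toList.take k ++ [q.toList[k]] = q.toList.take (k+1) := by
      rw [List.take_add_one]
      simp [List.getElem?_eq_getElem hk]
    rw [this]
    exact List.take_prefix _ _
  · rintro ⟨u, hu0⟩
    have hu : x.toList ++ '/' :: u = q.toList := by rw [← hu0]; simp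
    have hk : x.toList.length < q.toList.length := by
      rw [← hu]; simp
    refine ⟨((0:Int) + x.toList.length, q.toList[x.toList.length]), ?_, ?_, ?_⟩
    · rw [PySem.List.mem_enumerate_iff]
      exact ⟨x.toList.length, hk, rfl⟩
    · show q.toList[x.toList.length] = '/'
      have : q.toList[x.toList.length] = (x.toList ++ '/' :: u)[x.toList.length]'(by rw [hu]; exact hk) := by
        congr 1; exact hu.symm
      rw [this, List.getElem_append_right (le_refl _)]
      simp
    · apply String.toList_inj.mp
      have htl : (PySem.Str.slice q none (some ((0:Int) + x.toList.length))).toList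
          = q.toList.take x.toList.length := by
        rw [PySem.Str.toList_slice]
        simp only [PySem.Chars.slice_eq_listSlice, zero_add]
        exact PySem.List.slice_to_natCast _ _
      rw [htl, ← hu]
      simp

-- membership in B's folders set
theorem pv_mem_foldersB (paths : List String) (x : String) :
    (x ∈ pvFoldersB paths ↔ ∃ q ∈ paths, (x.toList ++ ['/']) <+: q.toList) := by
  unfold pvFoldersB
  suffices h : ∀ fs, x ∈ paths.foldl _ fs ↔ x ∈ fs ∨ ∃ q ∈ paths, (x.toList ++ ['/']) <+: q.toList by
    rw [h PySem.Set.empty]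
    simp [PySem.Set.empty]
  intro fs
  induction paths generalizing fs with
  | nil => simp
  | cons q rest ih =>
    simp only [List.foldl_cons]
    rw [ih, pv_mem_inner, pv_inner_iff]
    constructor
    · rintro ((hfs | hpre) | ⟨r, hr, hpre⟩)
      · exact Or.inl hfs
      · exact Or.inr ⟨q, List.mem_cons_self, hpre⟩
      · exact Or.inr ⟨r, List.mem_cons_of_mem _ hr, hpre⟩
    · rintro (hfs | ⟨r, hr, hpre⟩)
      · exact Or.inl (Or.inl hfs)
      · rcases List.mem_cons.mp hr with rfl | hr'
        · exact Or.inl (Or.inr hpre)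
        · exact Or.inr ⟨r, hr', hpre⟩

-- the two folder tests agree on every path that occurs in the list
theorem pv_contains_eq (paths : List String) (p : String)
    (hp : p ∈ PySem.List.sorted paths (fun x => x)) :
    PySem.Set.contains (identify_folders paths) p = PySem.Set.contains (pvFoldersB paths) p := by
  rw [Bool.eq_iff_iff, PySem.Set.contains_iff, PySem.Set.contains_iff]
  unfold identify_folders
  rw [pv_mem_foldersA _ _ _ (by simpa using PySem.List.sorted_pairwise paths (fun x => x)),
      pv_mem_foldersB]
  constructor
  · rintro (hfs | ⟨_, q, hq, hpre⟩)
    · simp [PySem.Set.empty] at hfs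
    · exact ⟨q, (PySem.List.mem_sorted _ _ _ _).mp hq, hpre⟩
  · rintro ⟨q, hq, hpre⟩
    exact Or.inr ⟨hp, q, (PySem.List.mem_sorted _ _ _ _).mpr hq, hpre⟩

theorem pv_main (paths : List String) :
    format_tree_structure paths = format_tree_structure_alt paths := by
  unfold format_tree_structure format_tree_structure_alt
  by_cases hnil : paths = []
  · simp [hnil]
  · rw [if_neg hnil, if_neg hnil]
    simp only
    have hbody : (fun (lines : List String) (path : String) =>
        let indent := pvStrRepeat "│   " (PySem.Str.count path "/")
        let name := (PySem.List.pyGet? ((PySem.Str.split? path "/").getD []) (-1)).getD ""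
        if PySem.Set.contains (identify_folders paths) path then lines ++ [indent ++ "├── " ++ name ++ "/"]
        else lines ++ [indent ++ "├── " ++ name])
        = fun lines path => lines ++
            [let indent := pvStrRepeat "│   " (PySem.Str.count path "/")
             let name := (PySem.List.pyGet? ((PySem.Str.split? path "/").getD []) (-1)).getD ""
             if PySem.Set.contains (identify_folders paths) path then indent ++ "├── " ++ name ++ "/"
             else indent ++ "├── " ++ name] := by
      funext lines path
      split_ifs <;> rfl
    rw [hbody, PySem.List.foldl_append_singleton_eq_map, List.nil_append]
    congr 1
    apply List.map_congr_left
    intro p hp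
    simp only
    rw [pv_contains_eq paths p hp]
    unfold pvRenderB
    rfl

-- ===== VERDICT (by name: the statement is the Claim_ definition above) =====
theorem format_tree_structure_spec : Claim_equal_format_tree_structure := by
  intro paths _
  unfold Spec_format_tree_structure
  exact pv_main paths
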